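-- pv_equiv track=rewrite | github.com/Aiven-Open/journalpump | journalpump/rsyslog.py | _generate_format
-- ===== SOURCE A (Python) =====
-- from typing import Callable, Dict, Optional
--
-- _LOGLINE_VARS: Dict[str, str] = {
--     "pri": "{pri}",
--     "protocol-version": "1",
--     "timestamp": "{rfc3164date}",
--     "timestamp:::date-rfc3339": "{rfc3339date}",
--     "HOSTNAME": "{hostname}",
--     "app-name": "{app_id}",
--     "procid": "{proc_id}",
--     "msgid": "{msg_id}",
--     "msg": "{msg}",
--     "structured-data": "{sd}",
--     "": "%",
-- }
--
-- def _generate_format(logline: str) -> str: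
--     """Simple tokenizer for converting rsyslog format string to python format string"""
--     frmt = ""
--     in_token = False
--     token = ""
--     for c in logline:
--         if c == "%" and not in_token:
--             in_token = True
--         elif c == "%" and in_token:
--             try:
--                 frmt += _LOGLINE_VARS[token]
--             except KeyError:
--                 frmt += "-"
--             token = ""
--             in_token = False
--         elif in_token:
--             token += c
--         else:
--             frmt += c
--             if c in {"{", "}"}:
--                 frmt += c
--
--     if frmt[-1] != "\n":
--         frmt += "\n"
--     return frmt
-- ===== SOURCE B (Python) =====
-- from typing import Dict
--
-- _LOGLINE_VARS: Dict[str, str] = {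
--     "pri": "{pri}",
--     "protocol-version": "1",
--     "timestamp": "{rfc3164date}",
--     "timestamp:::date-rfc3339": "{rfc3339date}",
--     "HOSTNAME": "{hostname}",
--     "app-name": "{app_id}",
--     "procid": "{proc_id}",
--     "msgid": "{msg_id}",
--     "msg": "{msg}",
--     "structured-data": "{sd}",
--     "": "%",
-- }
--
-- def _generate_format(logline: str) -> str:
--     """Convert rsyslog format string to python format string via split('%'):
--     even split segments are literal text, odd segments are tokens."""
--     head, *rest = logline.split("%")
--     frmt = "".join(c * 2 if c in "{}" else c for c in head)
--     while rest:
--         token = rest.pop(0)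
--         if rest:
--             literal = rest.pop(0)
--             frmt += _LOGLINE_VARS.get(token, "-")
--             frmt += "".join(c * 2 if c in "{}" else c for c in literal)
--         # a trailing unterminated token is dropped
--     if frmt[-1] != "\n":
--         frmt += "\n"
--     return frmt
-- ===== Notes on version B (the rewrite author's own statement) =====
-- stated objective: idiomatic
-- what changed: Replaces A's character-by-character tokenizer state machine (in_token flag and token accumulator) with split('%'): even segments are literal text with braces doubled, odd segments are tokens looked up via dict.get, a lone trailing token is dropped.
import Mathlib
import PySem

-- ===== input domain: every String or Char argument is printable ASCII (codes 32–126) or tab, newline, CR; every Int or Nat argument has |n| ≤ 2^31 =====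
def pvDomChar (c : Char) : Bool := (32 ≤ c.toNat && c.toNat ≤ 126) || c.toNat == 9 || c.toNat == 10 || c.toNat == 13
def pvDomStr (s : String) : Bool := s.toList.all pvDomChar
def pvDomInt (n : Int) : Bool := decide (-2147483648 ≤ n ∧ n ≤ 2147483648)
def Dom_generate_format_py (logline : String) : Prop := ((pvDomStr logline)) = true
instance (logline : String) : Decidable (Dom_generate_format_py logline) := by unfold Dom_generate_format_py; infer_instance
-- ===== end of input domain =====

-- B replaces A's character-by-character tokenizer state machine with split('%'):
-- even segments are literal text, odd segments are tokens (a trailing unterminated token is dropped).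


-- module constant _LOGLINE_VARS (shared by both versions in the Python module)
def LOGLINE_VARS : PySem.Dict (List Char) (List Char) := PySem.Dict.ofList [
  ("pri".toList, "{pri}".toList),
  ("protocol-version".toList, "1".toList),
  ("timestamp".toList, "{rfc3164date}".toList),
  ("timestamp:::date-rfc3339".toList, "{rfc3339date}".toList),
  ("HOSTNAME".toList, "{hostname}".toList),
  ("app-name".toList, "{app_id}".toList),
  ("procid".toList, "{proc_id}".toList),
  ("msgid".toList, "{msg_id}".toList),
  ("msg".toList, "{msg}".toList),
  ("structured-data".toList, "{sd}".toList),
  ([], "%".toList)]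

-- ===== PORT A =====
-- one iteration of A's for-loop over (frmt, in_token, token); try/except KeyError = match on get?
def aStep (st : List Char × Bool × List Char) (c : Char) : List Char × Bool × List Char :=
  let frmt := st.1; let in_token := st.2.1; let token := st.2.2
  if c = '%' ∧ in_token = false then (frmt, true, token)
  else if c = '%' ∧ in_token = true then
    (frmt ++ (match LOGLINE_VARS.get? token with
              | some v => v
              | none => "-".toList), false, [])
  else if in_token = true then (frmt, true, token ++ [c])
  else (frmt ++ [c] ++ (if c = '{' ∨ c = '}' then [c] else []), false, token)

def generate_format_py (logline : String) : String :=
  let frmt := (logline.toList.foldl aStep ([], false, [])).1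
  -- frmt[-1] raises IndexError on empty frmt (excluded by Pre_); pyGet? = none there
  String.mk (if PySem.List.pyGet? frmt (-1) ≠ some '\n' then frmt ++ ['\n'] else frmt)

-- ===== PORT B =====
-- "".join(c * 2 if c in "{}" else c for c in lit)
def bEsc (lit : List Char) : List Char :=
  lit.flatMap (fun c => if c = '{' ∨ c = '}' then [c, c] else [c])

-- B's while loop: rest alternates token, literal, token, literal, …; a lone trailing token is dropped
def bGo : List (List Char) → List Char
  | [] => []
  | [_] => []
  | tok :: lit :: rest => LOGLINE_VARS.getD tok "-".toList ++ bEsc lit ++ bGo rest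

def generate_format_py_alt (logline : String) : String :=
  let parts := PySem.Chars.splitOn logline.toList ['%']
  let frmt := match parts with
              | [] => []           -- unreachable: split never returns an empty list
              | head :: rest => bEsc head ++ bGo rest
  String.mk (if PySem.List.pyGet? frmt (-1) ≠ some '\n' then frmt ++ ['\n'] else frmt)

-- ===== PRECONDITION & SPEC =====
-- Pre_ excludes exactly the inputs where A (and B alike) raises IndexError at frmt[-1]:
-- those whose whole content is swallowed by an unterminated token, leaving frmt empty.
def Pre_generate_format_py (logline : String) : Prop :=
  logline.toList ≠ [] ∧ ¬(logline.toList.head? = some '%' ∧ logline.toList.count '%' = 1)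
instance (logline : String) : Decidable (Pre_generate_format_py logline) := by
  unfold Pre_generate_format_py; infer_instance

def pvWitness_generate_format_py : String := "<%pri%>%msg%"

def Spec_generate_format_py (logline : String) (out : String) : Prop := out = generate_format_py_alt logline
instance (logline : String) (out : String) : Decidable (Spec_generate_format_py logline out) := by unfold Spec_generate_format_py; infer_instance

-- ===== CLAIM (what is proved, stated in full; the proofs are below) =====
def Claim_equal_generate_format_py : Prop := ∀ (logline : String), Dom_generate_format_py logline → Pre_generate_format_py logline → Spec_generate_format_py logline (generate_format_py logline)

-- ===== LEMMAS AND PROOFS =====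

theorem modifyHead_id' {α : Type} (l : List α) : List.modifyHead (fun x => x) l = l := by
  cases l <;> simp

-- recursive characterization of split('%')
def mySplit : List Char → List (List Char)
  | [] => [[]]
  | c :: cs => if c = '%' then [] :: mySplit cs else (mySplit cs).modifyHead (c :: ·)

theorem go_eq : ∀ (fuel : Nat) (l cur : List Char) (acc : List (List Char)), l.length < fuel →
    PySem.Chars.splitOn.go ['%'] fuel l cur acc = acc.reverse ++ (mySplit l).modifyHead (cur.reverse ++ ·) := by
  intro fuel
  induction fuel with
  | zero => intro l cur acc h; omega
  | succ n ih =>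
    intro l cur acc h
    match l with
    | [] => simp [PySem.Chars.splitOn.go, mySplit]
    | c :: rest =>
      rw [PySem.Chars.splitOn.go]
      by_cases hc : c = '%'
      · subst hc
        simp only [List.isPrefixOf]
        rw [if_pos (by simp)]
        rw [ih _ _ _ (by simp at h ⊢; omega)]
        simp only [mySplit]
        rw [if_pos trivial]
        simp [modifyHead_id']
      · rw [if_neg]
        · rw [ih rest (c :: cur) acc (by simp at h ⊢; omega)]
          simp [mySplit, hc]
          cases mySplit rest <;> simp
        · simp [List.isPrefixOf]
          intro hh; exact absurd hh.symm hc

theorem splitOn_eq (l : List Char) : PySem.Chars.splitOn l ['%'] = mySplit l := by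
  rw [PySem.Chars.splitOn, go_eq _ _ _ _ (by omega)]
  simp [modifyHead_id']

theorem mySplit_ne_nil (cs : List Char) : mySplit cs ≠ [] := by
  cases cs with
  | nil => simp [mySplit]
  | cons c rest =>
    simp only [mySplit]
    split
    · simp
    · intro h
      have := congrArg List.length h
      simp at this
      exact mySplit_ne_nil rest this

def bAll : List (List Char) → List Char
  | [] => []
  | h :: rest => bEsc h ++ bGo rest

theorem aStep_main : ∀ (cs : List Char),
    (∀ frmt, (cs.foldl aStep (frmt, false, [])).1 = frmt ++ bAll (mySplit cs)) ∧
    (∀ frmt tok, (cs.foldl aStep (frmt, true, tok)).1 =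
        frmt ++ bGo ((mySplit cs).modifyHead (tok ++ ·))) := by
  intro cs
  induction cs with
  | nil =>
    constructor
    · intro frmt; simp [mySplit, bAll, bEsc, bGo]
    · intro frmt tok
      rcases mySplit_nil : mySplit ([] : List Char) with _ | ⟨h, t⟩
      · exact absurd mySplit_nil (mySplit_ne_nil [])
      · simp [mySplit] at mySplit_nil
        obtain ⟨rfl, rfl⟩ := mySplit_nil
        simp [bGo]
  | cons c rest ih =>
    obtain ⟨ihF, ihT⟩ := ih
    by_cases hc : c = '%'
    · subst hc
      constructor
      · intro frmt
        rw [List.foldl_cons, show aStep (frmt, false, []) '%' = (frmt, true, []) from by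
          simp [aStep]]
        rw [ihT frmt []]
        simp only [mySplit]
        rw [if_pos trivial]
        simp only [bAll]
        simp [modifyHead_id', bEsc]
      · intro frmt tok
        rw [List.foldl_cons, show aStep (frmt, true, tok) '%' =
            (frmt ++ (match LOGLINE_VARS.get? tok with
                      | some v => v
                      | none => "-".toList), false, []) from by simp [aStep]]
        rw [ihF]
        simp only [mySplit]
        rw [if_pos trivial]
        simp only [List.modifyHead]
        rcases hrest : mySplit rest with _ | ⟨h, t⟩
        · exact absurd hrest (mySplit_ne_nil rest)
        · rcases hg : LOGLINE_VARS.get? tok with _ | v <;>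
            simp [bGo, bAll, PySem.Dict.getD, hg]
    · constructor
      · intro frmt
        rw [List.foldl_cons, show aStep (frmt, false, []) c =
            (frmt ++ [c] ++ (if c = '{' ∨ c = '}' then [c] else []), false, []) from by
          simp [aStep, hc]]
        rw [ihF]
        simp only [mySplit, if_neg hc]
        rcases hrest : mySplit rest with _ | ⟨h, t⟩
        · exact absurd hrest (mySplit_ne_nil rest)
        · simp only [List.modifyHead, bAll, bEsc, List.flatMap_cons]
          split <;> simp
      · intro frmt tok
        rw [List.foldl_cons, show aStep (frmt, true, tok) c = (frmt, true, tok ++ [c]) from by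
          simp [aStep, hc]]
        rw [ihT]
        simp only [mySplit, if_neg hc]
        rcases hrest : mySplit rest with _ | ⟨h, t⟩
        · exact absurd hrest (mySplit_ne_nil rest)
        · rcases t with _ | ⟨l, t'⟩ <;> simp [bGo]

theorem frmt_eq (logline : String) :
    (logline.toList.foldl aStep ([], false, [])).1 =
      (match PySem.Chars.splitOn logline.toList ['%'] with
       | [] => []
       | head :: rest => bEsc head ++ bGo rest) := by
  rw [(aStep_main logline.toList).1 [], splitOn_eq]
  rcases h : mySplit logline.toList with _ | ⟨hd, t⟩
  · exact absurd h (mySplit_ne_nil _)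
  · simp [bAll]

-- ===== VERDICT (by name: the statement is the Claim_ definition above) =====
theorem generate_format_py_spec : Claim_equal_generate_format_py := by
  intro logline _ _
  unfold Spec_generate_format_py generate_format_py generate_format_py_alt
  rw [frmt_eq]
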